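-- pv_equiv track=rewrite | github.com/manwar/perlweeklychallenge-club | challenge-368/pokgopun/python/ch-1.py | mib
-- ===== SOURCE A (Python) =====
-- def mib(string: str, char: str) -> str:
--     idx = -1
--     l = len(string)
--     i = l
--     while True:
--         i = string.rfind(char, 0, i)
--         if i == -1:
--             break
--         if idx == -1 or string[i] < string[i+1]:
--             idx = i
--     if idx == -1:
--         return string
--     return "".join(string[i] for i in range(l) if i != idx)
-- ===== SOURCE B (Python) =====
-- def mib(string: str, char: str) -> str:
--     # Generate every string obtainable by deleting one character at an
--     # occurrence of char, and return the lexicographically largest one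
--     # (the original string if char does not occur).  A's greedy pick --
--     # first occurrence followed by a larger character, else the last
--     # occurrence -- is exactly the argmax of this candidate set.
--     def removals():
--         i = string.find(char)
--         while i != -1:
--             yield string[:i] + string[i + 1:]
--             i = string.find(char, i + 1)
--     return max(removals(), default=string)
-- ===== Notes on version B (the rewrite author's own statement) =====
-- stated objective: alternative
-- what changed: Replaces A's greedy backward scan that selects a single deletion index by a brute-force candidate enumeration: build every string obtained by deleting one char occurrence and return the lexicographic maximum (default: the string itself), relying on the proved fact that A's greedy pick is the argmax of that set.
-- outside the precondition, e.g. on mib('ababa', 'aba'): A returns 'abba', B returns 'baba'; on mib('ab', ''): A raises IndexError, B returns 'b'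
import Mathlib
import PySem

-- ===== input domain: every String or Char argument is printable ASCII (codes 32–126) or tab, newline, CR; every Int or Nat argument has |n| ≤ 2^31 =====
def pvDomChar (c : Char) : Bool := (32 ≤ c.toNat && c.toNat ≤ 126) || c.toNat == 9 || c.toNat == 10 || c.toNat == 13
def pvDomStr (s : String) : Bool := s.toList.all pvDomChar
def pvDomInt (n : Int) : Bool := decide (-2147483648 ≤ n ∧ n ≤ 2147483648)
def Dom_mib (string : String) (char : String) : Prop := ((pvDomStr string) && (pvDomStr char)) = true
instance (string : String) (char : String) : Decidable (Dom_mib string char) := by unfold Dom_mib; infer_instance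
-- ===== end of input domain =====

-- B replaces A's greedy backward selection of a deletion index by brute force: it enumerates every
-- string obtained by deleting one occurrence of char and returns the lexicographic maximum
-- (objective: alternative); proved equal on Pre_ (nonempty char that is a single character, or
-- any nonempty char with at most one occurrence position in string).

-- ===== PORT A =====
-- the while-True loop of A; fuel bounds the iterations, none = the loop raised (IndexError)
def mibLoopA (s : List Char) (ch : List Char) (idx : Int) (i : Int) : Nat → Option Int
  | 0 => none
  | fuel + 1 =>
    let i' := PySem.Chars.rfindFrom s ch 0 (some i)
    if i' = -1 then some idx
    else if idx = -1 then mibLoopA s ch i' i' fuel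
    else
      match PySem.List.pyGet? s i', PySem.List.pyGet? s (i' + 1) with
      | some a, some b => mibLoopA s ch (if a < b then i' else idx) i' fuel
      | _, _ => none

def mib (string : String) (char : String) : String :=
  let s := string.toList
  let l : Int := s.length
  match mibLoopA s char.toList (-1) l (s.length + 2) with
  | none => ""   -- Python raised here (only outside Pre_)
  | some idx =>
    if idx = -1 then string
    else String.ofList (((PySem.List.pyRange 0 l 1).filter (fun j => j ≠ idx)).map
      (fun j => PySem.List.pyGetD s j ' '))

-- ===== PORT B =====
-- B's generator: the list of candidate strings string[:i] + string[i+1:], one per occurrence of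
-- char found forward; fuel bounds the iterations (never exhausted: find positions strictly grow)
def mibCands (s : List Char) (ch : List Char) (i : Int) : Nat → Option (List (List Char))
  | 0 => none
  | fuel + 1 =>
    if i = -1 then some []
    else
      match mibCands s ch (PySem.Chars.findFrom s ch (i + 1)) fuel with
      | none => none
      | some rest =>
          some ((PySem.List.slice s none (some i) ++ PySem.List.slice s (some (i + 1)) none) :: rest)

-- max(removals(), default=string)
def mib_alt (string : String) (char : String) : String :=
  let s := string.toList
  match mibCands s char.toList (PySem.Chars.find s char.toList) (s.length + 2) with
  | none => ""   -- fuel exhausted: unreachable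
  | some cands =>
    match PySem.List.max? cands (fun x => x) with
    | none => string
    | some m => String.ofList m

-- ===== PRECONDITION & SPEC =====
-- Pre_ admits every single-character `char` (the task's natural domain) and any nonempty `char`
-- with at most one occurrence position in `string` (absent chars, char = string, …); it excludes
-- char = "" (A raises IndexError) and multi-character `char` occurring at several positions,
-- where A's backward rfind skips overlapping occurrences — an accident of its scan that B does
-- not reproduce.
def Pre_mib (string : String) (char : String) : Prop :=
  char.toList ≠ [] ∧
  (char.toList.length = 1 ∨
    (List.range string.toList.length).countP
      (fun j => char.toList.isPrefixOf (string.toList.drop j)) ≤ 1)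
instance (string : String) (char : String) : Decidable (Pre_mib string char) := by unfold Pre_mib; infer_instance

def pvWitness_mib : String × String := ("cab", "a")

def Spec_mib (string : String) (char : String) (out : String) : Prop := out = mib_alt string char
instance (string : String) (char : String) (out : String) : Decidable (Spec_mib string char out) := by unfold Spec_mib; infer_instance

-- ===== CLAIM (what is proved, stated in full; the proofs are below) =====
def Claim_equal_mib : Prop := ∀ (string : String) (char : String), Dom_mib string char → Pre_mib string char → Spec_mib string char (mib string char)

-- ===== LEMMAS AND PROOFS =====

def occb (s : List Char) (c : Char) (k : Nat) : Bool := s[k]? == some c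

def condb (s : List Char) (k : Nat) : Bool :=
  match s[k]?, s[k + 1]? with
  | some a, some b => a < b
  | _, _ => false

-- s with the character at position p deleted
def Rm (s : List Char) (p : Nat) : List Char := s.take p ++ s.drop (p + 1)

theorem occb_lt {s : List Char} {c : Char} {k : Nat} (h : occb s c k = true) : k < s.length := by
  unfold occb at h
  rcases h' : s[k]? with _ | a
  · rw [h'] at h; simp at h
  · exact (List.getElem?_eq_some_iff.mp h').1

theorem occb_get {s : List Char} {c : Char} {k : Nat} (h : occb s c k = true)
    (hk : k < s.length) : s[k] = c := by
  unfold occb at h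
  rw [List.getElem?_eq_getElem hk] at h
  simpa using h

theorem occb_of_get {s : List Char} {c : Char} {k : Nat} (hk : k < s.length)
    (h : s[k] = c) : occb s c k = true := by
  unfold occb
  rw [List.getElem?_eq_getElem hk, h]
  simp

theorem prefix_singleton (s : List Char) (c : Char) (k : Nat) :
    [c].isPrefixOf (s.drop k) = occb s c k := by
  rcases h : s.drop k with _ | ⟨a, t⟩
  · have : s[k]? = none := by
      rw [← List.head?_drop, h]; rfl
    simp [List.isPrefixOf, occb, this]
  · have : s[k]? = some a := by rw [← List.head?_drop, h]; rfl
    simp [List.isPrefixOf, occb, this, BEq.comm]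

theorem condb_lt {s : List Char} {k : Nat} (h : k + 1 < s.length) :
    condb s k = decide (s[k] < s[k + 1]) := by
  unfold condb
  rw [List.getElem?_eq_getElem (by omega), List.getElem?_eq_getElem h]

theorem condb_bound {s : List Char} {k : Nat} (h : condb s k = true) : k + 1 < s.length := by
  unfold condb at h
  rcases h' : s[k + 1]? with _ | b
  · rw [h'] at h
    rcases s[k]? <;> simp at h
  · exact (List.getElem?_eq_some_iff.mp h').1

-- least k < i with occb ∧ condb, else -1
def fcIn (s : List Char) (c : Char) : Nat → Int
  | 0 => -1
  | i + 1 =>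
    if fcIn s c i ≠ -1 then fcIn s c i
    else if occb s c i && condb s i then (i : Int) else -1

theorem fcIn_spec (s : List Char) (c : Char) (i : Nat) :
    (fcIn s c i = -1 ∧ ∀ k < i, ¬(occb s c k = true ∧ condb s k = true)) ∨
    (∃ m : Nat, fcIn s c i = (m : Int) ∧ m < i ∧ occb s c m = true ∧ condb s m = true ∧
      ∀ k < m, ¬(occb s c k = true ∧ condb s k = true)) := by
  induction i with
  | zero => left; exact ⟨rfl, by omega⟩
  | succ i ih =>
    rcases ih with ⟨h1, h2⟩ | ⟨m, h1, h2, h3, h4, h5⟩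
    · by_cases hc : occb s c i && condb s i
      · right
        refine ⟨i, ?_, by omega, ?_, ?_, h2⟩ <;>
          simp [fcIn, h1, (Bool.and_eq_true ..).mp hc]
      · left
        constructor
        · simp only [fcIn, h1]
          simp [hc]
        · intro k hk
          rcases Nat.lt_succ_iff_lt_or_eq.mp hk with hk' | rfl
          · exact h2 k hk'
          · intro ⟨o, cnd⟩; exact hc (by simp [o, cnd])
    · right
      refine ⟨m, ?_, by omega, h3, h4, h5⟩
      simp only [fcIn, h1]
      have : (m : Int) ≠ -1 := by omega
      simp [this]

-- skipping non-occurrences between r+1 and i leaves fcIn unchanged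
theorem fcIn_skip (s : List Char) (c : Char) (r i : Nat) (hri : r < i)
    (hno : ∀ k, r < k → k < i → occb s c k = false) : fcIn s c i = fcIn s c (r + 1) := by
  induction i with
  | zero => omega
  | succ i ih =>
    rcases Nat.eq_or_lt_of_le (Nat.succ_le_of_lt hri) with heq | hlt
    · have : r = i := by omega
      subst this; rfl
    · have hocc : occb s c i = false := hno i (by omega) (by omega)
      have heq2 : fcIn s c (i + 1) = fcIn s c i := by
        simp only [fcIn, hocc, Bool.false_and]
        split
        · rfl
        · next h => simp at h; exact h.symm
      rw [heq2]
      rcases Nat.eq_or_lt_of_le (Nat.succ_le_of_lt hri) with h | h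
      · omega
      · exact ih (by omega) (fun k h1 h2 => hno k h1 (by omega))

theorem rfind_go_spec (s : List Char) (c : Char) (j : Nat) :
    (PySem.Chars.rfind.go s [c] j = -1 ∧ ∀ k ≤ j, occb s c k = false) ∨
    (∃ r : Nat, PySem.Chars.rfind.go s [c] j = (r : Int) ∧ r ≤ j ∧ occb s c r = true ∧
      ∀ k, r < k → k ≤ j → occb s c k = false) := by
  induction j with
  | zero =>
    rw [PySem.Chars.rfind.go.eq_1]
    by_cases h : occb s c 0
    · right
      refine ⟨0, ?_, le_refl 0, h, by omega⟩
      have : [c].isPrefixOf s = occb s c 0 := by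
        have := prefix_singleton s c 0
        simpa using this
      simp [this, h]
    · left
      have hp : [c].isPrefixOf s = occb s c 0 := by
        have := prefix_singleton s c 0
        simpa using this
      constructor
      · simp [hp, h]
      · intro k hk
        have : k = 0 := by omega
        subst this
        simpa using h
  | succ j ih =>
    rw [PySem.Chars.rfind.go.eq_2, prefix_singleton]
    by_cases h : occb s c (j + 1)
    · right
      exact ⟨j + 1, by simp [h], le_refl _, h, by omega⟩
    · simp only [h]
      rcases ih with ⟨h1, h2⟩ | ⟨r, h1, h2, h3, h4⟩
      · left
        refine ⟨h1, fun k hk => ?_⟩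
        rcases Nat.lt_succ_iff_lt_or_eq.mp (Nat.lt_succ_of_le hk) with h' | rfl
        · exact h2 k (by omega)
        · simpa using h
      · right
        refine ⟨r, h1, by omega, h3, fun k hk1 hk2 => ?_⟩
        rcases Nat.eq_or_lt_of_le hk2 with rfl | h'
        · simpa using h
        · exact h4 k hk1 (by omega)

-- characterization of A's rfind(char, 0, i) call, for 0 ≤ i ≤ len(s), char = [c]
theorem rfindFrom_char_spec (s : List Char) (c : Char) (i : Nat) (hi : i ≤ s.length) :
    (PySem.Chars.rfindFrom s [c] 0 (some (i : Int)) = -1 ∧ ∀ k < i, occb s c k = false) ∨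
    (∃ r : Nat, PySem.Chars.rfindFrom s [c] 0 (some (i : Int)) = (r : Int) ∧ r < i ∧ occb s c r = true ∧
      ∀ k, r < k → k < i → occb s c k = false) := by
  have htl : (List.take i s).length = i := by simp; omega
  have hocc : ∀ k : Nat, occb (List.take i s) c k = (decide (k < i) && occb s c k) := by
    intro k
    unfold occb
    rw [List.getElem?_take]
    by_cases h : k < i <;> simp [h]
  have hunf : PySem.Chars.rfindFrom s [c] 0 (some (i : Int)) =
      (if PySem.Chars.rfind (List.take i s) [c] = -1 then -1
       else PySem.Chars.rfind (List.take i s) [c]) := by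
    have h1 : ¬ ((s.length : Int) < (i : Int)) := by omega
    have h2 : ¬ ((i : Int) < 0) := by omega
    simp only [PySem.Chars.rfindFrom, h1, h2, if_false, lt_irrefl]
    norm_num
  rw [hunf]
  unfold PySem.Chars.rfind
  rw [htl]
  rcases rfind_go_spec (List.take i s) c i with ⟨h1, h2⟩ | ⟨r, h1, h2, h3, h4⟩
  · left
    rw [h1]
    refine ⟨by simp, fun k hk => ?_⟩
    have := h2 k (by omega)
    rw [hocc k] at this
    simpa [hk] using this
  · rw [hocc r] at h3
    have hr : r < i := by
      by_contra h
      simp [h] at h3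
    right
    refine ⟨r, ?_, hr, by simpa [hr] using h3, fun k hk1 hk2 => ?_⟩
    · rw [h1]; simp
    · have := h4 k hk1 (by omega)
      rw [hocc k] at this
      simpa [hk2] using this

theorem occb_prefix {s : List Char} {c : Char} {m : Nat} :
    occb s c m = true ↔ [c] <+: List.drop m s := by
  rw [← List.isPrefixOf_iff_prefix, prefix_singleton]

theorem findFrom_char_spec (s : List Char) (c : Char) (k : Nat) (hk : k ≤ s.length) :
    (PySem.Chars.findFrom s [c] (k : Int) = -1 ∧ ∀ m, k ≤ m → occb s c m = false) ∨
    (∃ r : Nat, PySem.Chars.findFrom s [c] (k : Int) = (r : Int) ∧ k ≤ r ∧ r < s.length ∧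
      occb s c r = true ∧ ∀ m, k ≤ m → m < r → occb s c m = false) := by
  by_cases h : PySem.Chars.findFrom s [c] (k : Int) = -1
  · left
    refine ⟨h, fun m hm => ?_⟩
    have hninf := (PySem.Chars.findFrom_natCast_eq_neg_one_iff s [c] k hk).mp h
    by_contra hocc
    simp only [Bool.not_eq_false] at hocc
    have hpre := occb_prefix.mp hocc
    have : List.drop m s = List.drop (m - k) (List.drop k s) := by
      rw [List.drop_drop]; congr 1; omega
    rw [this] at hpre
    exact hninf (hpre.isInfix.trans (List.drop_suffix (m - k) (List.drop k s)).isInfix)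
  · right
    obtain ⟨hle, hpre, hmin⟩ := PySem.Chars.findFrom_natCast_spec s [c] k hk h
    set f := PySem.Chars.findFrom s [c] (k : Int) with hf
    have hocc : occb s c f.toNat = true := occb_prefix.mpr hpre
    refine ⟨f.toNat, by omega, by omega, occb_lt hocc, hocc, fun m hm1 hm2 => ?_⟩
    by_contra hm
    simp only [Bool.not_eq_false] at hm
    exact hmin m hm1 hm2 (occb_prefix.mp hm)

theorem loopA_spec (s : List Char) (c : Char) (fuel : Nat) :
    ∀ (i : Nat) (idx : Int), i < s.length → 0 ≤ idx → i + 2 ≤ fuel →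
    mibLoopA s [c] idx (i : Int) fuel = some (if fcIn s c i = -1 then idx else fcIn s c i) := by
  induction fuel with
  | zero => intro i idx _ _ h3; omega
  | succ f ih =>
    intro i idx hi hidx hf
    rcases rfindFrom_char_spec s c i (le_of_lt hi) with ⟨h1, h2⟩ | ⟨r, h1, h2, h3, h4⟩
    · simp only [mibLoopA, h1]
      rcases fcIn_spec s c i with ⟨e1, _⟩ | ⟨m, _, e2, em, _, _⟩
      · rw [e1]; simp
      · exact absurd em (by simp [h2 m e2])
    · simp only [mibLoopA, h1]
      rw [if_neg (by omega : ¬ ((r : Int) = -1)), if_neg (by omega : ¬ (idx = -1))]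
      have hr1 : r + 1 < s.length := by omega
      have hg1 : PySem.List.pyGet? s (r : Int) = some s[r] := by
        rw [PySem.List.pyGet?_natCast, List.getElem?_eq_getElem (by omega)]
      have hg2 : PySem.List.pyGet? s ((r : Int) + 1) = some s[r + 1] := by
        have : (r : Int) + 1 = ((r + 1 : Nat) : Int) := by push_cast; ring
        rw [this, PySem.List.pyGet?_natCast, List.getElem?_eq_getElem hr1]
      rw [hg1, hg2]
      simp only []
      have hidx' : 0 ≤ if s[r] < s[r + 1] then (r : Int) else idx := by
        split <;> omega
      rw [ih r _ (by omega) hidx' (by omega)]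
      have hskip : fcIn s c i = fcIn s c (r + 1) :=
        fcIn_skip s c r i h2 (fun k hk1 hk2 => h4 k hk1 hk2)
      have hunf : fcIn s c (r + 1) =
          if fcIn s c r ≠ -1 then fcIn s c r else if occb s c r && condb s r then (r : Int) else -1 := by
        simp only [fcIn]
      have hcnd : condb s r = decide (s[r] < s[r + 1]) := condb_lt hr1
      by_cases hc : s[r] < s[r + 1]
      · have hcr : condb s r = true := by rw [hcnd]; simp [hc]
        rw [if_pos hc]
        rcases fcIn_spec s c r with ⟨e1, _⟩ | ⟨m, e1, _, _, _, _⟩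
        · rw [hskip, hunf, e1]
          simp [h3, hcr]
        · rw [hskip, hunf, e1]
          have hne : ((m : Int) ≠ -1) := by omega
          simp only [ne_eq]
          rw [if_neg (by omega : ¬ ((m : Int) = -1))]
          simp [hne]
      · have hcr : condb s r = false := by rw [hcnd]; simp [hc]
        rw [if_neg hc]
        have : fcIn s c i = fcIn s c r := by
          rw [hskip, hunf, hcr]
          split
          · rfl
          · next h => simp at h; simp [h]
        rw [this]

theorem mapTake (s : List Char) : ∀ m, m ≤ s.length →
    (PySem.List.pyRange 0 (m : Int) 1).map (fun j => PySem.List.pyGetD s j ' ') = s.take m := by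
  intro m
  induction m with
  | zero => intro _; simp [PySem.List.pyRange_one_eq_nil]
  | succ m ih =>
    intro hm
    have : ((m + 1 : Nat) : Int) = (m : Int) + 1 := by push_cast; ring
    rw [this, PySem.List.pyRange_one_succ_right (by omega), List.map_append, ih (by omega)]
    rw [List.take_add_one]
    simp only [List.map_cons, List.map_nil, PySem.List.pyGetD_natCast]
    congr 1
    rw [List.getElem?_eq_getElem (by omega : m < s.length)]
    simp [List.getD_eq_getElem?_getD, List.getElem?_eq_getElem (by omega : m < s.length)]

theorem filterMapOut (s : List Char) (m : Nat) (hm : m < s.length) :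
    ((PySem.List.pyRange 0 (s.length : Int) 1).filter (fun j => j ≠ (m : Int))).map
      (fun j => PySem.List.pyGetD s j ' ') = Rm s m := by
  have hsplit : PySem.List.pyRange 0 (s.length : Int) 1 =
      PySem.List.pyRange 0 (m : Int) 1 ++ PySem.List.pyRange (m : Int) ((m : Int) + 1) 1 ++
        PySem.List.pyRange ((m : Int) + 1) (s.length : Int) 1 := by
    rw [PySem.List.pyRange_one_append 0 (m : Int) (s.length : Int) (by omega) (by omega),
        PySem.List.pyRange_one_append (m : Int) ((m : Int) + 1) (s.length : Int) (by omega) (by omega),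
        List.append_assoc]
  rw [hsplit, List.filter_append, List.filter_append, PySem.List.pyRange_one_singleton]
  have hf1 : (PySem.List.pyRange 0 (m : Int) 1).filter (fun j => j ≠ (m : Int)) =
      PySem.List.pyRange 0 (m : Int) 1 := by
    rw [List.filter_eq_self]
    intro a ha
    have := PySem.List.mem_pyRange_one.mp ha
    have hne : a ≠ (m : Int) := by omega
    simp [hne]
  have hf2 : ([(m : Int)]).filter (fun j => j ≠ (m : Int)) = [] := by simp
  have hf3 : (PySem.List.pyRange ((m : Int) + 1) (s.length : Int) 1).filter (fun j => j ≠ (m : Int)) =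
      PySem.List.pyRange ((m : Int) + 1) (s.length : Int) 1 := by
    rw [List.filter_eq_self]
    intro a ha
    have := PySem.List.mem_pyRange_one.mp ha
    have hne : a ≠ (m : Int) := by omega
    simp [hne]
  rw [hf1, hf2, hf3, List.append_nil, List.map_append, mapTake s m (by omega)]
  unfold Rm
  congr 1
  have h2 := PySem.List.map_pyGetD_pyRange s ' ' (a := (m : Int) + 1) (by omega)
  rw [PySem.List.len_eq] at h2
  have h3 : ((m : Int) + 1).toNat = m + 1 := by omega
  rw [h3] at h2
  exact h2

-- a non-(-1) result of rfind.go is an occurrence position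
theorem rfind_go_pos (s : List Char) (ch : List Char) :
    ∀ j : Nat, PySem.Chars.rfind.go s ch j ≠ -1 →
      ∃ r : Nat, PySem.Chars.rfind.go s ch j = (r : Int) ∧ r ≤ j ∧ ch.isPrefixOf (s.drop r) = true := by
  intro j
  induction j with
  | zero =>
    rw [PySem.Chars.rfind.go.eq_1]
    split
    · next h => exact fun _ => ⟨0, by simp, le_refl 0, by simpa using h⟩
    · simp
  | succ j ih =>
    rw [PySem.Chars.rfind.go.eq_2]
    split
    · next h => exact fun _ => ⟨j + 1, rfl, le_refl _, h⟩
    · intro h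
      obtain ⟨r, h1, h2, h3⟩ := ih h
      exact ⟨r, h1, by omega, h3⟩

-- rfind.go = -1 means no occurrence at any position ≤ j
theorem rfind_go_none (s : List Char) (ch : List Char) :
    ∀ j : Nat, PySem.Chars.rfind.go s ch j = -1 →
      ∀ k ≤ j, ch.isPrefixOf (s.drop k) = false := by
  intro j
  induction j with
  | zero =>
    rw [PySem.Chars.rfind.go.eq_1]
    split
    · intro hgo
      exact absurd hgo (by norm_num)
    · next h =>
      intro _ k hk
      have : k = 0 := by omega
      subst this
      rw [List.drop_zero]
      simp only [Bool.eq_false_iff, ne_eq]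
      exact h
  | succ j ih =>
    rw [PySem.Chars.rfind.go.eq_2]
    split
    · intro hgo
      exact absurd hgo (by omega)
    · next h =>
      intro hgo k hk
      rcases Nat.lt_succ_iff_lt_or_eq.mp (Nat.lt_succ_of_le hk) with h' | rfl
      · exact ih hgo k (by omega)
      · simp only [Bool.eq_false_iff, ne_eq]
        exact h

-- ===== B-side: the occurrence list and the candidate characterization =====

-- the (increasing) list of occurrence positions of c in s from index j on
def occsFrom (s : List Char) (c : Char) (j : Nat) : List Nat :=
  if h : j < s.length then
    (if occb s c j then [j] else []) ++ occsFrom s c (j + 1)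
  else []
termination_by s.length - j

theorem occsFrom_mem (s : List Char) (c : Char) (j : Nat) (k : Nat) :
    k ∈ occsFrom s c j ↔ j ≤ k ∧ occb s c k = true := by
  rw [occsFrom]
  by_cases h : j < s.length
  · rw [dif_pos h, List.mem_append, occsFrom_mem s c (j + 1) k]
    constructor
    · rintro (hk | ⟨h1, h2⟩)
      · split at hk
        · next ho =>
          simp only [List.mem_singleton] at hk
          subst hk
          exact ⟨le_refl _, ho⟩
        · simp at hk
      · exact ⟨by omega, h2⟩
    · rintro ⟨h1, h2⟩
      rcases Nat.eq_or_lt_of_le h1 with rfl | h1'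
      · left; simp [h2]
      · right; exact ⟨by omega, h2⟩
  · rw [dif_neg h]
    simp only [List.not_mem_nil, false_iff, not_and]
    intro _ ho
    have := occb_lt ho
    omega
termination_by s.length - j

theorem occsFrom_skip (s : List Char) (c : Char) (j k0 : Nat) (hj : j ≤ k0)
    (hno : ∀ m, j ≤ m → m < k0 → occb s c m = false) :
    occsFrom s c j = occsFrom s c k0 := by
  rcases Nat.eq_or_lt_of_le hj with rfl | hlt
  · rfl
  · have hocc : occb s c j = false := hno j (le_refl j) hlt
    have hstep : occsFrom s c j = occsFrom s c (j + 1) := by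
      rw [occsFrom]
      by_cases h : j < s.length
      · rw [dif_pos h, hocc]
        simp
      · rw [dif_neg h]
        have : occsFrom s c (j + 1) = [] := by
          rw [occsFrom, dif_neg (by omega)]
        rw [this]
    rw [hstep]
    exact occsFrom_skip s c (j + 1) k0 (by omega) (fun m h1 h2 => hno m (by omega) h2)
termination_by k0 - j

theorem occsFrom_cons (s : List Char) (c : Char) (k0 : Nat) (hk : k0 < s.length)
    (ho : occb s c k0 = true) : occsFrom s c k0 = k0 :: occsFrom s c (k0 + 1) := by
  rw [occsFrom, dif_pos hk, ho]
  simp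

-- B's candidate list is exactly the removal at each occurrence position, in order
theorem candsSpec (s : List Char) (c : Char) (fuel : Nat) :
    ∀ (j : Nat), j ≤ s.length → s.length - j + 2 ≤ fuel →
    mibCands s [c] (PySem.Chars.findFrom s [c] (j : Int)) fuel
      = some ((occsFrom s c j).map (Rm s)) := by
  induction fuel with
  | zero => intro j _ h2; omega
  | succ f ih =>
    intro j hj hf
    rcases findFrom_char_spec s c j hj with ⟨h1, h2⟩ | ⟨k0, h1, h2, h3, h4, h5⟩
    · rw [h1]
      simp only [mibCands]
      have : occsFrom s c j = [] := by
        rw [List.eq_nil_iff_forall_not_mem]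
        intro k hk
        obtain ⟨hk1, hk2⟩ := (occsFrom_mem s c j k).mp hk
        simp [h2 k hk1] at hk2
      rw [this]
      simp
    · rw [h1]
      simp only [mibCands]
      rw [if_neg (by omega : ¬ ((k0 : Int) = -1))]
      have hcast : (k0 : Int) + 1 = ((k0 + 1 : Nat) : Int) := by push_cast; ring
      rw [hcast, ih (k0 + 1) (by omega) (by omega)]
      rw [occsFrom_skip s c j k0 h2 (fun m hm1 hm2 => h5 m hm1 hm2),
          occsFrom_cons s c k0 h3 h4]
      rw [PySem.List.slice_to_natCast, PySem.List.slice_from_natCast]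
      rfl

-- ===== comparison of removal candidates =====

theorem lex_mid {x y : Char} (pre u v : List Char) (h : x < y) :
    (pre ++ x :: u) < (pre ++ y :: v) :=
  List.append_left_lt (List.cons_lt_cons_iff.mpr (Or.inl h))

-- removing either of two equal adjacent characters gives the same list
theorem Rm_eq_succ {s : List Char} {p : Nat} (hp : p + 1 < s.length)
    (h : s[p] = s[p + 1]) : Rm s p = Rm s (p + 1) := by
  unfold Rm
  rw [List.drop_eq_getElem_cons hp, ← h,
      ← List.take_concat_get (show p < s.length by omega),
      List.concat_eq_append, List.append_assoc]
  rfl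

-- deleting at q < a is lexicographically smaller when s[q+1] < s[q]
theorem Rm_lt_left {s : List Char} {q a : Nat} (hqa : q < a) (ha : a < s.length)
    (h : s[q + 1] < s[q]) : Rm s q < Rm s a := by
  have hq1 : q + 1 < s.length := by omega
  have e1 : Rm s q = s.take q ++ s[q + 1] :: s.drop (q + 2) := by
    unfold Rm
    rw [List.drop_eq_getElem_cons hq1]
  have e2 : Rm s a = s.take q ++ s[q] :: ((s.drop (q + 1)).take (a - q - 1) ++ s.drop (a + 1)) := by
    unfold Rm
    have : a = q + (a - q) := by omega
    rw [this, List.take_add, List.drop_eq_getElem_cons (by omega : q < s.length)]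
    have : a - q = (a - q - 1) + 1 := by omega
    rw [this, List.take_succ_cons]
    simp [List.append_assoc]
  rw [e1, e2]
  exact lex_mid _ _ _ h

-- deleting at q > a is lexicographically smaller when s[a] < s[a+1]
theorem Rm_lt_right {s : List Char} {a q : Nat} (haq : a < q) (hq : q < s.length)
    (h : s[a] < s[a + 1]) : Rm s q < Rm s a := by
  have ha1 : a + 1 < s.length := by omega
  have e1 : Rm s a = s.take a ++ s[a + 1] :: s.drop (a + 2) := by
    unfold Rm
    rw [List.drop_eq_getElem_cons ha1]
  have e2 : Rm s q = s.take a ++ s[a] :: ((s.drop (a + 1)).take (q - a - 1) ++ s.drop (q + 1)) := by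
    unfold Rm
    have : q = a + (q - a) := by omega
    rw [this, List.take_add, List.drop_eq_getElem_cons (by omega : a < s.length)]
    have : q - a = (q - a - 1) + 1 := by omega
    rw [this, List.take_succ_cons]
    simp [List.append_assoc]
  rw [e1, e2]
  exact lex_mid _ _ _ h

-- chain argument: below a position a preceded only by non-increasing occurrences,
-- every removal at an occurrence is ≤ the removal at a
theorem Rm_le_up (s : List Char) (c : Char) (a : Nat) (ha : a < s.length)
    (hnc : ∀ j, occb s c j = true → j < a → condb s j = false) :
    ∀ n q, a - q ≤ n → occb s c q = true → q ≤ a → Rm s q ≤ Rm s a := by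
  intro n
  induction n with
  | zero =>
    intro q hle _ hqa
    have : q = a := by omega
    subst this
    exact le_refl _
  | succ n ih =>
    intro q hle hocc hqa
    rcases Nat.eq_or_lt_of_le hqa with rfl | hlt
    · exact le_refl _
    · have hq1 : q + 1 < s.length := by omega
      have hcnd : condb s q = false := hnc q hocc hlt
      rw [condb_lt hq1] at hcnd
      have hng : ¬ s[q] < s[q + 1] := by simpa using hcnd
      rcases lt_or_eq_of_le (le_of_not_gt hng) with hlt2 | heq
      · exact le_of_lt (Rm_lt_left hlt ha hlt2)
      · rw [Rm_eq_succ hq1 heq.symm]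
        have hocc' : occb s c (q + 1) = true := by
          apply occb_of_get hq1
          rw [heq]
          exact occb_get hocc (by omega)
        exact ih (q + 1) (by omega) hocc' (by omega)

-- the two elaborations of max? on List Char (core list order vs. the linear order) agree
theorem max?_bridge (xs : List (List Char)) :
    PySem.List.max? xs (fun x => x)
      = @PySem.List.max? (List Char) (List Char) List.instLinearOrder.toLT
          LinearOrder.toDecidableLT xs (fun x => x) := by
  unfold PySem.List.max?
  apply List.foldl_ext
  intro acc x _
  cases acc with
  | none => rfl
  | some m =>
    simp only []
    exact @if_congr _ _ _ (m.decidableLT x)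
      (LinearOrder.toDecidableLT ((fun x : List Char => x) m) ((fun x : List Char => x) x))
      _ _ _ _ (List.lt_iff_lex_lt m x) rfl rfl

-- the maximum of the candidate list is the removal at a, provided a dominates
theorem max_cands (s : List Char) (c : Char) (a : Nat) (hocc : occb s c a = true)
    (hmax : ∀ q, occb s c q = true → Rm s q ≤ Rm s a) :
    PySem.List.max? ((occsFrom s c 0).map (Rm s)) (fun x => x) = some (Rm s a) := by
  have hamem : Rm s a ∈ (occsFrom s c 0).map (Rm s) :=
    List.mem_map_of_mem ((occsFrom_mem s c 0 a).mpr ⟨Nat.zero_le a, hocc⟩)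
  rw [max?_bridge]
  rcases hm : @PySem.List.max? (List Char) (List Char) List.instLinearOrder.toLT
      LinearOrder.toDecidableLT ((occsFrom s c 0).map (Rm s)) (fun x => x) with _ | mx
  · have := (@PySem.List.max?_eq_none_iff (List Char) (List Char) List.instLinearOrder.toLT
        LinearOrder.toDecidableLT ((occsFrom s c 0).map (Rm s)) (fun x => x)).mp hm
    rw [this] at hamem
    simp at hamem
  · have hmem := @PySem.List.max?_mem (List Char) (List Char) List.instLinearOrder.toLT
        LinearOrder.toDecidableLT ((occsFrom s c 0).map (Rm s)) (fun x => x) mx hm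
    obtain ⟨q, hq, rfl⟩ := List.mem_map.mp hmem
    obtain ⟨_, hoq⟩ := (occsFrom_mem s c 0 q).mp hq
    have h1 : Rm s q ≤ Rm s a := hmax q hoq
    have h2 : Rm s a ≤ Rm s q := by
      simpa using PySem.List.max?_isMax hm (Rm s a) hamem
    rw [le_antisymm h1 h2]

-- ===== assembling the two sides =====

theorem mib_main_single (string : String) (c : Char) (char : String)
    (hc : char.toList = [c]) : mib string char = mib_alt string char := by
  set s := string.toList with hs
  have hfind0 : PySem.Chars.find s [c] = PySem.Chars.findFrom s [c] ((0 : Nat) : Int) := by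
    rw [Nat.cast_zero, PySem.Chars.findFrom_zero]
  have hcands := candsSpec s c (s.length + 2) 0 (by omega) (by omega)
  rcases rfindFrom_char_spec s c s.length (le_refl _) with ⟨h1, h2⟩ | ⟨r, h1, h2, h3, h4⟩
  · -- no occurrence of c in s: both return string unchanged
    have hA : mibLoopA s [c] (-1) (s.length : Int) (s.length + 2) = some (-1) := by
      conv_lhs => rw [mibLoopA]
      simp only [h1]
      simp
    have hempty : occsFrom s c 0 = [] := by
      rw [List.eq_nil_iff_forall_not_mem]
      intro k hk
      obtain ⟨_, hk2⟩ := (occsFrom_mem s c 0 k).mp hk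
      have := occb_lt hk2
      simp [h2 k this] at hk2
    rw [hempty] at hcands
    simp only [mib, mib_alt, hc, ← hs, hA, hfind0, hcands, List.map_nil]
    rw [show PySem.List.max? ([] : List (List Char)) (fun x => x) = none from rfl]
    simp
  · -- r is the last occurrence of c in s
    have hstep : mibLoopA s [c] (-1) (s.length : Int) (s.length + 2) =
        mibLoopA s [c] (r : Int) (r : Int) (s.length + 1) := by
      conv_lhs => rw [mibLoopA]
      simp only [h1]
      rw [if_neg (by omega : ¬((r : Int) = -1))]
      simp
    have hA := loopA_spec s c (s.length + 1) r (r : Int) h2 (by omega) (by omega)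
    -- the index A finally removes, with its domination property
    obtain ⟨a, haeq, hoa, hmax⟩ :
        ∃ a : Nat, (if fcIn s c r = -1 then (r : Int) else fcIn s c r) = (a : Int) ∧
          occb s c a = true ∧ ∀ q, occb s c q = true → Rm s q ≤ Rm s a := by
      rcases fcIn_spec s c r with ⟨e1, e2⟩ | ⟨m, e1, e2, e3, e4, e5⟩
      · refine ⟨r, by rw [e1]; simp, h3, fun q hq => ?_⟩
        have hql : q < s.length := occb_lt hq
        have hqr : q ≤ r := by
          by_contra h
          simp [h4 q (by omega) hql] at hq
        exact Rm_le_up s c r h2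
          (fun j hj hjr => by
            by_contra hcj
            simp only [Bool.not_eq_false] at hcj
            exact e2 j hjr ⟨hj, hcj⟩)
          (r - q) q (by omega) hq hqr
      · have hm1 : m + 1 < s.length := condb_bound e4
        have hslt : s[m] < s[m + 1] := by
          rw [condb_lt hm1] at e4
          simpa using e4
        refine ⟨m, by rw [e1]; simp [show (m : Int) ≠ -1 by omega], e3, fun q hq => ?_⟩
        have hql : q < s.length := occb_lt hq
        rcases Nat.lt_trichotomy q m with h | rfl | h
        · exact Rm_le_up s c m (by omega)
            (fun j hj hjm => by
              by_contra hcj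
              simp only [Bool.not_eq_false] at hcj
              exact e5 j hjm ⟨hj, hcj⟩)
            (m - q) q (by omega) hq (by omega)
        · exact le_refl _
        · exact le_of_lt (Rm_lt_right h hql hslt)
    have hal : a < s.length := occb_lt hoa
    have hAside : mib string char = String.ofList (Rm s a) := by
      simp only [mib, hc, ← hs]
      rw [hstep, hA, haeq]
      simp only [Option.some.injEq]
      rw [if_neg (by omega : ¬((a : Int) = -1)), filterMapOut s a hal]
    have hBside : mib_alt string char = String.ofList (Rm s a) := by
      simp only [mib_alt, hc, ← hs]
      rw [hfind0, hcands]
      simp only []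
      rw [max_cands s c a hoa hmax]
    rw [hAside, hBside]

theorem mib_main_unique (string : String) (char : String)
    (hne : char.toList ≠ [])
    (huniq : (List.range string.toList.length).countP
      (fun j => char.toList.isPrefixOf (string.toList.drop j)) ≤ 1) :
    mib string char = mib_alt string char := by
  set s := string.toList with hs
  set ch := char.toList with hch
  have hocc_lt : ∀ j : Nat, ch.isPrefixOf (s.drop j) = true → j < s.length := by
    intro j hj
    by_contra h
    have hdrop : s.drop j = [] := List.drop_eq_nil_iff.mpr (by omega)
    rw [hdrop] at hj
    have := List.isPrefixOf_iff_prefix.mp hj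
    exact hne (List.prefix_nil.mp this)
  have huo : ∀ j k : Nat, ch.isPrefixOf (s.drop j) = true → ch.isPrefixOf (s.drop k) = true → j = k := by
    intro j k hj hk
    by_contra hjk
    have hmj : j ∈ (List.range s.length).filter (fun j => ch.isPrefixOf (s.drop j)) :=
      List.mem_filter.mpr ⟨List.mem_range.mpr (hocc_lt j hj), hj⟩
    have hmk : k ∈ (List.range s.length).filter (fun j => ch.isPrefixOf (s.drop j)) :=
      List.mem_filter.mpr ⟨List.mem_range.mpr (hocc_lt k hk), hk⟩
    have hnd : ((List.range s.length).filter (fun j => ch.isPrefixOf (s.drop j))).Nodup :=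
      (List.nodup_range).filter _
    have hsub : ({j, k} : Finset Nat) ⊆
        ((List.range s.length).filter (fun j => ch.isPrefixOf (s.drop j))).toFinset := by
      intro x hx
      rcases Finset.mem_insert.mp hx with rfl | hx
      · exact List.mem_toFinset.mpr hmj
      · exact List.mem_toFinset.mpr (Finset.mem_singleton.mp hx ▸ hmk)
    have hcard : ({j, k} : Finset Nat).card = 2 := Finset.card_pair hjk
    have := Finset.card_le_card hsub
    rw [hcard, List.toFinset_card_of_nodup hnd, ← List.countP_eq_length_filter] at this
    omega
  by_cases hrf0 : PySem.Chars.rfind s ch = -1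
  · -- no occurrence at all
    have hnone : ∀ k, ch.isPrefixOf (s.drop k) = false := by
      intro k
      by_cases hk : k ≤ s.length
      · exact rfind_go_none s ch s.length hrf0 k hk
      · rw [List.drop_eq_nil_iff.mpr (by omega)]
        rcases h : ch with _ | ⟨x, t⟩
        · exact absurd h hne
        · simp [List.isPrefixOf]
    have hA : mibLoopA s ch (-1) (s.length : Int) (s.length + 2) = some (-1) := by
      conv_lhs => rw [mibLoopA]
      have h1 : PySem.Chars.rfindFrom s ch 0 (some (s.length : Int)) = -1 := by
        have hx1 : ¬ ((s.length : Int) < (s.length : Int)) := by omega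
        have hx2 : ¬ ((s.length : Int) < 0) := by omega
        simp only [PySem.Chars.rfindFrom, hx1, hx2, if_false, lt_irrefl]
        norm_num
        exact hrf0
      simp only [h1]
      simp
    have hfind : PySem.Chars.find s ch = -1 := by
      rw [PySem.Chars.find_eq_neg_one_iff]
      intro hinf
      obtain ⟨q, hq⟩ := (PySem.Chars.exists_prefix_drop_iff_isIn ch s).mpr
        ((PySem.Chars.isIn_iff_infix ch s).mpr hinf)
      exact absurd (List.isPrefixOf_iff_prefix.mpr hq) (by simp [hnone q])
    have hB : mibCands s ch (-1) (s.length + 2) = some [] := by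
      rw [mibCands]
      simp
    simp only [mib, mib_alt, ← hs, ← hch, hA, hfind, hB]
    rw [show PySem.List.max? ([] : List (List Char)) (fun x => x) = none from rfl]
    simp
  · -- exactly one occurrence, at r
    obtain ⟨r, hg, _, hr⟩ := rfind_go_pos s ch s.length hrf0
    have hrf : PySem.Chars.rfind s ch = (r : Int) := hg
    have hrl : r < s.length := hocc_lt r hr
    have h1 : PySem.Chars.rfindFrom s ch 0 (some (s.length : Int)) = (r : Int) := by
      have hx1 : ¬ ((s.length : Int) < (s.length : Int)) := by omega
      have hx2 : ¬ ((s.length : Int) < 0) := by omega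
      simp only [PySem.Chars.rfindFrom, hx1, hx2, if_false, lt_irrefl]
      norm_num
      rw [hrf]
      simp
    have h2 : PySem.Chars.rfindFrom s ch 0 (some ((r : Int))) = -1 := by
      have hx1 : ¬ ((s.length : Int) < (r : Int)) := by omega
      have hx2 : ¬ ((r : Int) < 0) := by omega
      simp only [PySem.Chars.rfindFrom, hx1, hx2, if_false, lt_irrefl]
      norm_num
      by_contra hq
      unfold PySem.Chars.rfind at hq
      obtain ⟨q, g1, g2, g3⟩ := rfind_go_pos (s.take r) ch ((s.take r).length) hq
      rw [List.drop_take] at g3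
      obtain ⟨gp, glen⟩ := List.prefix_take_iff.mp (List.isPrefixOf_iff_prefix.mp g3)
      have hqr : q = r := huo q r (List.isPrefixOf_iff_prefix.mpr gp) hr
      have hlen0 : ch.length = 0 := by omega
      exact hne (List.eq_nil_of_length_eq_zero hlen0)
    have hstep : mibLoopA s ch (-1) (s.length : Int) (s.length + 2) =
        mibLoopA s ch (r : Int) (r : Int) (s.length + 1) := by
      conv_lhs => rw [mibLoopA]
      simp only [h1]
      rw [if_neg (by omega : ¬((r : Int) = -1))]
      simp
    have hA : mibLoopA s ch (r : Int) (r : Int) (s.length + 1) = some (r : Int) := by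
      conv_lhs => rw [mibLoopA]
      simp only [h2]
      simp
    -- B: find also lands on r, the forward scan finds nothing after it
    have hinf : ch <:+: s :=
      ((List.isPrefixOf_iff_prefix.mp hr).isInfix).trans (List.drop_suffix r s).isInfix
    have hfne : PySem.Chars.find s ch ≠ -1 := by
      rw [ne_eq, PySem.Chars.find_eq_neg_one_iff]
      exact fun h => h hinf
    have hfge : 0 ≤ PySem.Chars.find s ch := by
      have := PySem.Chars.neg_one_le_find s ch
      omega
    have hfind : PySem.Chars.find s ch = (r : Int) := by
      obtain ⟨hp, _⟩ := PySem.Chars.find_spec hfge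
      have := huo (PySem.Chars.find s ch).toNat r (List.isPrefixOf_iff_prefix.mpr hp) hr
      omega
    have hff : PySem.Chars.findFrom s ch ((r : Int) + 1) = -1 := by
      have hc1 : (r : Int) + 1 = ((r + 1 : Nat) : Int) := by push_cast; ring
      rw [hc1, PySem.Chars.findFrom_natCast_eq_neg_one_iff s ch (r + 1) (by omega)]
      intro hinf'
      obtain ⟨q, hq⟩ := (PySem.Chars.exists_prefix_drop_iff_isIn ch (s.drop (r + 1))).mpr
        ((PySem.Chars.isIn_iff_infix ch (s.drop (r + 1))).mpr hinf')
      rw [List.drop_drop] at hq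
      have := huo (r + 1 + q) r (List.isPrefixOf_iff_prefix.mpr hq) hr
      omega
    have hB : mibCands s ch ((r : Int)) (s.length + 2) = some [Rm s r] := by
      have hrest : mibCands s ch (PySem.Chars.findFrom s ch ((r : Int) + 1)) (s.length + 1)
          = some [] := by
        rw [hff, mibCands]
        simp
      conv_lhs => rw [mibCands]
      rw [if_neg (by omega : ¬((r : Int) = -1)), hrest,
          PySem.List.slice_to_natCast,
          show (r : Int) + 1 = ((r + 1 : Nat) : Int) by push_cast; ring,
          PySem.List.slice_from_natCast]
      rfl
    have hAside : mib string char = String.ofList (Rm s r) := by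
      simp only [mib, ← hs, ← hch]
      rw [hstep, hA]
      simp only [Option.some.injEq]
      rw [if_neg (by omega : ¬((r : Int) = -1)), filterMapOut s r hrl]
    have hBside : mib_alt string char = String.ofList (Rm s r) := by
      simp only [mib_alt, ← hs, ← hch]
      rw [hfind, hB]
      simp only []
      rw [show PySem.List.max? [Rm s r] (fun x => x) = some (Rm s r) from rfl]
    rw [hAside, hBside]

theorem mib_main : ∀ (string : String) (char : String), Pre_mib string char → mib string char = mib_alt string char := by
  intro string char hpre
  obtain ⟨hne, hpre⟩ := hpre
  rcases hpre with hpre | huniq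
  case inr => exact mib_main_unique string char hne huniq
  obtain ⟨c, hc⟩ : ∃ c, char.toList = [c] := by
    rcases h : char.toList with _ | ⟨c, t⟩
    · rw [h] at hpre; simp at hpre
    · rcases t with _ | ⟨d, t'⟩
      · exact ⟨c, rfl⟩
      · rw [h] at hpre; simp at hpre
  exact mib_main_single string c char hc

-- ===== VERDICT =====
theorem mib_spec : Claim_equal_mib := by
  intro string char _ hpre
  unfold Spec_mib
  exact mib_main string char hpre
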